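-- pv_equiv track=rewrite | github.com/alambertova/methyltransferases | assign_groups_to_ec_summary.py | choose_group_for_ecs
-- ===== SOURCE A (Python) =====
-- def choose_group_for_ecs(ecs: list[str], ec_to_group: dict[str, str]) -> str:
--     """
--     If the summary row contains multiple ECs (like "2.1.1.1|2.1.1.2"),
--     decide the group:
--       - if all ECs map to the same group -> that group
--       - if some map to different groups -> "MULTIPLE"
--       - if none map -> "UNKNOWN"
--       - if mix of known+unknown -> "MIXED"
--     """
--     if not ecs:
--         return "NO_EC"
--
--     groups = []
--     unknown = 0
--     for ec in ecs:
--         g = ec_to_group.get(ec)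
--         if g is None:
--             unknown += 1
--         else:
--             groups.append(g)
--
--     groups_set = set(groups)
--
--     if not groups and unknown:
--         return "UNKNOWN"
--     if groups and unknown:
--         # some known, some unknown
--         return "MIXED"
--     if len(groups_set) == 1:
--         return next(iter(groups_set))
--     return "MULTIPLE"
-- ===== SOURCE B (Python) =====
-- def choose_group_for_ecs(ecs: list[str], ec_to_group: dict[str, str]) -> str:
--     # Staged short-circuit scans instead of one pass building a list + counter + set:
--     # first decide the known/unknown shape with any(), then check homogeneity by
--     # comparing every mapped group against the first EC's group.
--     if not ecs:
--         return "NO_EC"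
--     if any(ec not in ec_to_group for ec in ecs):
--         if any(ec in ec_to_group for ec in ecs):
--             return "MIXED"
--         return "UNKNOWN"
--     ref = ec_to_group[ecs[0]]
--     if all(ec_to_group[ec] == ref for ec in ecs):
--         return ref
--     return "MULTIPLE"
-- ===== Notes on version B (the rewrite author's own statement) =====
-- stated objective: faster
-- what changed: Replaces A's single accumulating pass (groups list + unknown counter + set) with staged short-circuit scans: two any() membership scans decide UNKNOWN/MIXED, then homogeneity is checked by comparing every mapped group against the first EC's group with all(), so no intermediate collection is ever allocated.
import Mathlib
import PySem

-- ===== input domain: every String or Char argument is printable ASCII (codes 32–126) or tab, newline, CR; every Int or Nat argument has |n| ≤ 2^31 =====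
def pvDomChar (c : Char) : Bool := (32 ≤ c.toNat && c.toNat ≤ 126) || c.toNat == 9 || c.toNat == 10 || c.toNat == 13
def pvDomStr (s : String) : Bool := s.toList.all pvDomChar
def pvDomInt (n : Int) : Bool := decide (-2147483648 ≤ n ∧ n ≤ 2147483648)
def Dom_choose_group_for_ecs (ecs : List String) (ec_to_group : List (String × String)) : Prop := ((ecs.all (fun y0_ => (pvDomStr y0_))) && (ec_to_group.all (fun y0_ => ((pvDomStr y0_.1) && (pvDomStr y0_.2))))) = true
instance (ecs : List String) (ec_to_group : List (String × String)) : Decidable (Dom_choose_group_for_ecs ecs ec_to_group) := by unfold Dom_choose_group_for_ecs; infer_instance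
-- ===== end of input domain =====

-- B replaces A's accumulating pass (groups list + unknown counter + set) with staged short-circuit
-- membership scans plus a comparison of every mapped group against the first EC's group (objective: alternative).

-- ===== PORT A =====
def choose_group_for_ecs (ecs : List String) (ec_to_group : List (String × String)) : String :=
  if ecs = [] then "NO_EC"
  else
    let d := PySem.Dict.ofList ec_to_group
    let st := ecs.foldl (fun (p : List String × Int) ec =>
        match d.get? ec with
        | none => (p.1, p.2 + 1)
        | some g => (p.1 ++ [g], p.2)) ([], 0)
    let groups := st.1
    let unknown := st.2
    let groups_set : PySem.Set String := PySem.Set.ofList groups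
    if groups = [] ∧ unknown ≠ 0 then "UNKNOWN"
    else if groups ≠ [] ∧ unknown ≠ 0 then "MIXED"
    else if groups_set.length = 1 then groups_set.headD ""   -- next(iter(groups_set)), taken only when the set is a singleton
    else "MULTIPLE"

-- ===== PORT B =====
def choose_group_for_ecs_alt (ecs : List String) (ec_to_group : List (String × String)) : String :=
  match ecs with
  | [] => "NO_EC"
  | e0 :: _ =>
    let d := PySem.Dict.ofList ec_to_group
    if ecs.any (fun ec => !(d.contains ec)) then
      if ecs.any (fun ec => d.contains ec) then "MIXED" else "UNKNOWN"
    else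
      let ref := (d.get? e0).getD ""   -- ec_to_group[ecs[0]]: taken only when every EC is a key, so get? is always some here
      if ecs.all (fun ec => (d.get? ec).getD "" == ref) then ref else "MULTIPLE"

-- ===== PRECONDITION & SPEC =====
def Spec_choose_group_for_ecs (ecs : List String) (ec_to_group : List (String × String)) (out : String) : Prop := out = choose_group_for_ecs_alt ecs ec_to_group
instance (ecs : List String) (ec_to_group : List (String × String)) (out : String) : Decidable (Spec_choose_group_for_ecs ecs ec_to_group out) := by unfold Spec_choose_group_for_ecs; infer_instance

-- ===== CLAIM (what is proved, stated in full; the proofs are below) =====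
def Claim_equal_choose_group_for_ecs : Prop := ∀ (ecs : List String) (ec_to_group : List (String × String)), Dom_choose_group_for_ecs ecs ec_to_group → Spec_choose_group_for_ecs ecs ec_to_group (choose_group_for_ecs ecs ec_to_group)

-- ===== LEMMAS AND PROOFS =====

-- A's loop over ecs, characterised: groups = known labels in order, unknown = #unmapped ECs.
theorem pv_fold_spec (d : PySem.Dict String String) :
    ∀ (ecs : List String) (gs : List String) (u : Int),
      ecs.foldl (fun (p : List String × Int) ec =>
        match d.get? ec with
        | none => (p.1, p.2 + 1)
        | some g => (p.1 ++ [g], p.2)) (gs, u)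
      = (gs ++ (ecs.map (fun ec => d.get? ec)).filterMap id,
         u + ((ecs.map (fun ec => d.get? ec)).count none : Int)) := by
  intro ecs
  induction ecs with
  | nil => intro gs u; simp
  | cons e rest ih =>
    intro gs u
    cases h : d.get? e with
    | none => simp [List.foldl_cons, h, ih]; ring
    | some g => simp [List.foldl_cons, h, ih]

-- a nodup list whose elements all equal a, containing a, is [a]
theorem pv_nodup_const (S : List String) (a : String)
    (hnd : S.Nodup) (hall : ∀ x ∈ S, x = a) (hmem : a ∈ S) : S = [a] := by
  cases S with
  | nil => simp at hmem
  | cons b t =>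
    have hb : b = a := hall b List.mem_cons_self
    subst hb
    have ht : t = [] := by
      cases t with
      | nil => rfl
      | cons c u =>
        have hc : c = b := hall c (by simp)
        simp [hc] at hnd
    simp [ht]

-- ===== VERDICT (by name: the statement is the Claim_ definition above) =====
theorem choose_group_for_ecs_spec : Claim_equal_choose_group_for_ecs := by
  intro ecs ectg _
  unfold Spec_choose_group_for_ecs choose_group_for_ecs choose_group_for_ecs_alt
  cases ecs with
  | nil => simp
  | cons e0 rest =>
    simp only [if_neg (List.cons_ne_nil e0 rest)]
    rw [pv_fold_spec]
    set d := PySem.Dict.ofList ectg with hd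
    set es := e0 :: rest with hes
    set ms : List (Option String) := es.map (fun ec => d.get? ec) with hms
    simp only [List.nil_append, Int.zero_add]
    set groups : List String := ms.filterMap id with hgroups
    have hms_mem : ∀ ec ∈ es, d.get? ec ∈ ms := by
      intro ec hec; rw [hms]; exact List.mem_map.mpr ⟨ec, hec, rfl⟩
    by_cases hn : es.any (fun ec => !(d.contains ec)) = true
    · -- some EC is unknown
      obtain ⟨ec, hec, hecn⟩ := List.any_eq_true.mp hn
      have hnone : d.get? ec = none := by
        apply (PySem.Dict.get?_eq_none_iff_contains d ec).mpr
        simpa using hecn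
      have hnm : (none : Option String) ∈ ms := hnone ▸ hms_mem ec hec
      have hcount : ms.count none ≠ 0 := by
        have := List.count_pos_iff.mpr hnm; omega
      by_cases hk : es.any (fun ec => d.contains ec) = true
      · -- mix → MIXED
        obtain ⟨ec', hec', heck⟩ := List.any_eq_true.mp hk
        obtain ⟨v, hv⟩ : ∃ v, d.get? ec' = some v := by
          rcases h : d.get? ec' with _ | v
          · exfalso
            have := (PySem.Dict.get?_eq_none_iff_contains d ec').mp h
            simp [this] at heck
          · exact ⟨v, rfl⟩
        have hvg : v ∈ groups := by
          rw [hgroups]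
          exact List.mem_filterMap.mpr ⟨some v, hv ▸ hms_mem ec' hec', rfl⟩
        have hgne : groups ≠ [] := by intro h; simp [h] at hvg
        simp [hn, hk, hgne, hcount]
      · -- all unknown → UNKNOWN
        have hall : ∀ x ∈ ms, x = none := by
          intro x hx
          rw [hms] at hx
          obtain ⟨ec', hec', rfl⟩ := List.mem_map.mp hx
          rcases h : d.get? ec' with _ | v
          · rfl
          · exfalso
            have hcc : d.contains ec' = true := by
              by_contra hc
              rw [Bool.not_eq_true] at hc
              rw [(PySem.Dict.get?_eq_none_iff_contains d ec').mpr hc] at h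
              simp at h
            exact hk (List.any_eq_true.mpr ⟨ec', hec', hcc⟩)
        have hg : groups = [] := by
          rw [hgroups]
          rw [List.filterMap_eq_nil_iff]
          intro x hx; simp [hall x hx]
        simp [hn, hk, hg, hcount]
    · -- every EC is known
      have hkn : ∀ ec ∈ es, ∃ v, d.get? ec = some v := by
        intro ec hec
        rcases h : d.get? ec with _ | v
        · exact absurd (List.any_eq_true.mpr
            ⟨ec, hec, by simp [(PySem.Dict.get?_eq_none_iff_contains d ec).mp h]⟩) hn
        · exact ⟨v, rfl⟩
      have hnmem : (none : Option String) ∉ ms := by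
        intro hx
        rw [hms] at hx
        obtain ⟨ec', hec', h⟩ := List.mem_map.mp hx
        obtain ⟨v, hv⟩ := hkn ec' hec'
        rw [hv] at h; simp at h
      have hcount : ms.count none = 0 := List.count_eq_zero.mpr hnmem
      obtain ⟨g0, hg0⟩ := hkn e0 (by simp [hes])
      have hg0g : g0 ∈ groups := by
        rw [hgroups]
        exact List.mem_filterMap.mpr ⟨some g0, hg0 ▸ hms_mem e0 (by simp [hes]), rfl⟩
      have hgne : groups ≠ [] := by intro h; simp [h] at hg0g
      have hgrpmem : ∀ x ∈ groups, some x ∈ ms := by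
        intro x hx
        rw [hgroups] at hx
        obtain ⟨o, ho, hid⟩ := List.mem_filterMap.mp hx
        cases o with
        | none => simp at hid
        | some y => simp at hid; subst hid; exact ho
      have hmem_grp : ∀ ec ∈ es, (d.get? ec).getD "" ∈ groups := by
        intro ec hec
        obtain ⟨v, hv⟩ := hkn ec hec
        rw [hgroups, hv]
        exact List.mem_filterMap.mpr ⟨some v, hv ▸ hms_mem ec hec, rfl⟩
      have hgrp_of : ∀ x ∈ groups, ∃ ec ∈ es, d.get? ec = some x := by
        intro x hx
        have := hgrpmem x hx
        rw [hms] at this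
        obtain ⟨ec, hec, h⟩ := List.mem_map.mp this
        exact ⟨ec, hec, h⟩
      simp only [hn, hcount, ne_eq, Bool.false_eq_true, if_false, false_and, hgne]
      by_cases hall : es.all (fun ec => (d.get? ec).getD "" == g0) = true
      · -- homogeneous: A's set is [g0], both return g0
        have hallg : ∀ x ∈ groups, x = g0 := by
          intro x hx
          obtain ⟨ec, hec, hv⟩ := hgrp_of x hx
          have := List.all_eq_true.mp hall ec hec
          rw [hv] at this; simpa using this
        have hset : PySem.Set.ofList groups = [g0] :=
          pv_nodup_const _ _ (PySem.Set.nodup_ofList groups)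
            (fun x hx => hallg x ((PySem.Set.mem_ofList groups x).mp hx))
            ((PySem.Set.mem_ofList groups g0).mpr hg0g)
        simp [hset, hall, hg0]
      · -- inhomogeneous: some group differs from g0 → set has ≥ 2 elements → MULTIPLE
        have hlen : (PySem.Set.ofList groups).length ≠ 1 := by
          intro h1
          obtain ⟨y, hy⟩ := List.length_eq_one_iff.mp h1
          have hally : ∀ x ∈ groups, x = y := by
            intro x hx
            have := (PySem.Set.mem_ofList groups x).mpr hx
            rw [hy] at this; simpa using this
          apply hall
          rw [List.all_eq_true]
          intro ec hec
          have h1 := hally _ (hmem_grp ec hec)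
          have h2 := hally _ (hmem_grp e0 (by simp [hes]))
          rw [hg0] at h2
          simp at h2
          simp [h1, h2]
        have hallB : (es.all fun ec => (d.get? ec).getD "" == g0) = false :=
          Bool.eq_false_iff.mpr hall
        simp [hlen, hg0, hallB]
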